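-- pv_equiv track=rewrite | github.com/miliar/Code_Jam_Webscraper | Solutions_python/Problem_190/39.py | makesmaller
-- ===== SOURCE A (Python) =====
-- def makesmaller(A):
--     if len(A)==1:
--         return A
--     else:
--         l =len(A)//2
--         L = makesmaller(A[:l])
--         R = makesmaller(A[l:])
--         return min(L+R,R+L)
-- ===== SOURCE B (Python) =====
-- def makesmaller(A):
--     # Iterative post-order evaluation with an explicit work stack instead of recursion.
--     work = [(A, False)]
--     vals = []
--     while work:
--         seg, ready = work.pop()
--         if ready:
--             R = vals.pop()
--             L = vals.pop()
--             vals.append(min(L + R, R + L))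
--         elif len(seg) == 1:
--             vals.append(seg)
--         else:
--             l = len(seg) // 2
--             work.append((seg, True))
--             work.append((seg[l:], False))
--             work.append((seg[:l], False))
--     return vals[0]
-- ===== Notes on version B (the rewrite author's own statement) =====
-- stated objective: alternative
-- what changed: Replaces the recursive divide-and-conquer with an iterative post-order traversal using an explicit work stack and a value stack; same len//2 split and min(L+R,R+L) merge.
-- outside the precondition, e.g. on makesmaller([]): A raises RecursionError, B does not finish within the time limit
import Mathlib
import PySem

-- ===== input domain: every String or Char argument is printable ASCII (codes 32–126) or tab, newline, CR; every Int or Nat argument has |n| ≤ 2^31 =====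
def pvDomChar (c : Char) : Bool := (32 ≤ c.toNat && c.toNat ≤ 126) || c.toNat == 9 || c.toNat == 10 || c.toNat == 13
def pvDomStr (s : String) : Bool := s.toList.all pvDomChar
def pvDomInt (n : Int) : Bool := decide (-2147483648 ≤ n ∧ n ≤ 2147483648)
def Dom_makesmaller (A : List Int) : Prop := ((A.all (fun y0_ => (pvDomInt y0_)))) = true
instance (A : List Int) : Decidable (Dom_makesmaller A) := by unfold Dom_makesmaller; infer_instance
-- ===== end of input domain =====

-- B replaces A's recursion by an explicit-stack post-order loop (alternative decomposition, same cost).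

-- ===== PORT A =====
-- Python's builtin min on two int lists (lexicographic; returns the FIRST argument on ties).
def pyListLt : List Int → List Int → Bool
  | [], [] => false
  | [], _ :: _ => true
  | _ :: _, [] => false
  | a :: as, b :: bs => if a < b then true else if b < a then false else pyListLt as bs

def pyMin2 (x y : List Int) : List Int := if pyListLt y x then y else x

-- A's recursion, with a fuel counter only to totalize it (A.length is always enough fuel for
-- nonempty input; on [] Python recurses forever — RecursionError — excluded by Pre_).
-- A[:l] / A[l:] with 0 ≤ l ≤ len are exactly take/drop.
def makesmallerF : Nat → List Int → List Int
  | 0, A => A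
  | fuel + 1, A =>
      if A.length == 1 then A
      else
        let l := A.length / 2
        let L := makesmallerF fuel (A.take l)
        let R := makesmallerF fuel (A.drop l)
        pyMin2 (L ++ R) (R ++ L)

def makesmaller (A : List Int) : List Int := makesmallerF A.length A

-- ===== PORT B =====
-- B's own copy of Python's builtin min on two int lists (lexicographic; first argument on ties).
def pvListLt : List Int → List Int → Bool
  | [], [] => false
  | [], _ :: _ => true
  | _ :: _, [] => false
  | a :: as, b :: bs => if a < b then true else if b < a then false else pvListLt as bs

def pvMin (x y : List Int) : List Int := if pvListLt y x then y else x

-- the while loop of Source B; work/value stacks with the top at the head.  The fuel counts loop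
-- iterations and only totalizes the loop (4*len+1 iterations always suffice for nonempty input;
-- on [] Python's loop runs forever — excluded by Pre_).
def pvLoopF : Nat → List (List Int × Bool) → List (List Int) → List (List Int)
  | _, [], vals => vals
  | 0, _ :: _, vals => vals
  | fuel + 1, (_, true) :: rest, vals =>
      (match vals with
       | r :: l :: vs => pvLoopF fuel rest (pvMin (l ++ r) (r ++ l) :: vs)
       | _ => vals)          -- unreachable: Python's vals.pop() would raise IndexError
  | fuel + 1, (seg, false) :: rest, vals =>
      if seg.length == 1 then pvLoopF fuel rest (seg :: vals)
      else
        let l := seg.length / 2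
        pvLoopF fuel ((seg.take l, false) :: (seg.drop l, false) :: (seg, true) :: rest) vals

def makesmaller_alt (A : List Int) : List Int :=
  (pvLoopF (4 * A.length + 1) [(A, false)] []).headD []

-- ===== PRECONDITION & SPEC =====
-- Pre_ excludes only the empty list, on which A recurses forever (RecursionError) and B loops forever.
def Pre_makesmaller (A : List Int) : Prop := A ≠ []
instance (A : List Int) : Decidable (Pre_makesmaller A) := by unfold Pre_makesmaller; infer_instance
def pvWitness_makesmaller : List Int := [3, 1, 2]

def Spec_makesmaller (A : List Int) (out : List Int) : Prop := out = makesmaller_alt A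
instance (A : List Int) (out : List Int) : Decidable (Spec_makesmaller A out) := by unfold Spec_makesmaller; infer_instance

-- ===== CLAIM (what is proved, stated in full; the proofs are below) =====
def Claim_equal_makesmaller : Prop := ∀ (A : List Int), Dom_makesmaller A → Pre_makesmaller A → Spec_makesmaller A (makesmaller A)

-- ===== LEMMAS AND PROOFS =====

theorem pvListLt_eq (x y : List Int) : pvListLt x y = pyListLt x y := by
  induction x generalizing y with
  | nil => cases y <;> rfl
  | cons a as ih =>
    cases y with
    | nil => rfl
    | cons b bs => rw [pvListLt, pyListLt, ih]

theorem pvMin_eq (x y : List Int) : pvMin x y = pyMin2 x y := by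
  rw [pvMin, pyMin2, pvListLt_eq]

-- unfolding equations
theorem pvLoopF_nil (f : Nat) (vals : List (List Int)) : pvLoopF f [] vals = vals := by
  cases f <;> rfl

theorem pvLoopF_true (f : Nat) (seg : List Int) (rest : List (List Int × Bool)) (r l : List Int)
    (vs : List (List Int)) :
    pvLoopF (f + 1) ((seg, true) :: rest) (r :: l :: vs) =
      pvLoopF f rest (pvMin (l ++ r) (r ++ l) :: vs) := rfl

theorem pvLoopF_leaf (f : Nat) (seg : List Int) (rest : List (List Int × Bool))
    (vals : List (List Int)) (h : seg.length = 1) :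
    pvLoopF (f + 1) ((seg, false) :: rest) vals = pvLoopF f rest (seg :: vals) := by
  simp [pvLoopF, h]

theorem pvLoopF_split (f : Nat) (seg : List Int) (rest : List (List Int × Bool))
    (vals : List (List Int)) (h : seg.length ≠ 1) :
    pvLoopF (f + 1) ((seg, false) :: rest) vals =
      pvLoopF f ((seg.take (seg.length / 2), false) :: (seg.drop (seg.length / 2), false) ::
        (seg, true) :: rest) vals := by
  simp [pvLoopF, h]

theorem makesmallerF_succ (f : Nat) (A : List Int) :
    makesmallerF (f + 1) A =
      if A.length == 1 then A
      else
        pyMin2 (makesmallerF f (A.take (A.length / 2)) ++ makesmallerF f (A.drop (A.length / 2)))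
          (makesmallerF f (A.drop (A.length / 2)) ++ makesmallerF f (A.take (A.length / 2))) := rfl

-- fuel irrelevance for A's port: any fuel ≥ the length computes the same value (nonempty input)
theorem makesmallerF_irrel (n : Nat) : ∀ (A : List Int) (f1 f2 : Nat), A ≠ [] →
    A.length ≤ n → A.length ≤ f1 → A.length ≤ f2 → makesmallerF f1 A = makesmallerF f2 A := by
  induction n with
  | zero => intro A _ _ hne hlen _ _; cases A <;> simp_all
  | succ n ih =>
    intro A f1 f2 hne hlen h1 h2
    have hpos : 1 ≤ A.length := List.length_pos_iff.mpr hne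
    obtain ⟨g1, rfl⟩ : ∃ g, f1 = g + 1 := ⟨f1 - 1, by omega⟩
    obtain ⟨g2, rfl⟩ : ∃ g, f2 = g + 1 := ⟨f2 - 1, by omega⟩
    rw [makesmallerF_succ, makesmallerF_succ]
    by_cases hone : A.length = 1
    · simp [hone]
    · have h2le : 2 ≤ A.length := by omega
      have hlt : (A.take (A.length / 2)).length = A.length / 2 := by
        rw [List.length_take]; omega
      have hld : (A.drop (A.length / 2)).length = A.length - A.length / 2 := List.length_drop ..
      have htne : A.take (A.length / 2) ≠ [] := by
        intro h; rw [h] at hlt; simp at hlt; omega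
      have hdne : A.drop (A.length / 2) ≠ [] := by
        intro h; rw [h] at hld; simp at hld; omega
      rw [ih (A.take (A.length / 2)) g1 g2 htne (by omega) (by omega) (by omega),
          ih (A.drop (A.length / 2)) g1 g2 hdne (by omega) (by omega) (by omega)]

-- the loop invariant: processing a nonempty not-ready segment takes exactly 3*len-2 iterations
-- and pushes makesmaller of it onto the value stack
theorem pvLoop_spec (n : Nat) : ∀ (seg : List Int), seg.length ≤ n → seg ≠ [] →
    ∀ (f : Nat) (rest : List (List Int × Bool)) (vals : List (List Int)),
    pvLoopF (f + (3 * seg.length - 2)) ((seg, false) :: rest) vals =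
      pvLoopF f rest (makesmaller seg :: vals) := by
  induction n with
  | zero => intro seg hlen hne; cases seg <;> simp_all
  | succ n ih =>
    intro seg hlen hne f rest vals
    have hpos : 1 ≤ seg.length := List.length_pos_iff.mpr hne
    by_cases hone : seg.length = 1
    · have : f + (3 * seg.length - 2) = f + 1 := by omega
      rw [this, pvLoopF_leaf _ _ _ _ hone]
      have : makesmaller seg = seg := by
        rw [makesmaller, hone]; simp [makesmallerF, hone]
      rw [this]
    · have h2le : 2 ≤ seg.length := by omega
      have hlt : (seg.take (seg.length / 2)).length = seg.length / 2 := by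
        rw [List.length_take]; omega
      have hld : (seg.drop (seg.length / 2)).length = seg.length - seg.length / 2 :=
        List.length_drop ..
      have htne : seg.take (seg.length / 2) ≠ [] := by
        intro h; rw [h] at hlt; simp at hlt; omega
      have hdne : seg.drop (seg.length / 2) ≠ [] := by
        intro h; rw [h] at hld; simp at hld; omega
      -- fuel bookkeeping: 3n-2 = 1 + (3l-2) + (3(n-l)-2) + 1
      have hfuel : f + (3 * seg.length - 2) =
          (((f + 1) + (3 * (seg.drop (seg.length / 2)).length - 2)) +
            (3 * (seg.take (seg.length / 2)).length - 2)) + 1 := by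
        rw [hlt, hld]; omega
      rw [hfuel, pvLoopF_split _ _ _ _ hone,
          ih (seg.take (seg.length / 2)) (by omega) htne,
          ih (seg.drop (seg.length / 2)) (by omega) hdne,
          pvLoopF_true, pvMin_eq]
      -- identify the merged value with makesmaller seg
      have hm : makesmaller seg =
          pyMin2 (makesmaller (seg.take (seg.length / 2)) ++ makesmaller (seg.drop (seg.length / 2)))
            (makesmaller (seg.drop (seg.length / 2)) ++ makesmaller (seg.take (seg.length / 2))) := by
        obtain ⟨m, hmeq⟩ : ∃ m, seg.length = m + 1 := ⟨seg.length - 1, by omega⟩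
        rw [makesmaller, hmeq, makesmallerF_succ, if_neg (by simpa [hmeq] using hone)]
        rw [makesmaller, makesmaller, ← hmeq]
        rw [makesmallerF_irrel seg.length (seg.take (seg.length / 2)) m
              (seg.take (seg.length / 2)).length htne (by omega) (by omega) (by omega),
            makesmallerF_irrel seg.length (seg.drop (seg.length / 2)) m
              (seg.drop (seg.length / 2)).length hdne (by omega) (by omega) (by omega)]
      rw [hm]

-- ===== VERDICT (by name: the statement is the Claim_ definition above) =====
theorem makesmaller_spec : Claim_equal_makesmaller := by
  intro A _ hpre
  unfold Spec_makesmaller makesmaller_alt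
  have hpos : 1 ≤ A.length := List.length_pos_iff.mpr hpre
  have hfuel : 4 * A.length + 1 = (A.length + 3) + (3 * A.length - 2) := by omega
  rw [hfuel, pvLoop_spec A.length A le_rfl hpre, pvLoopF_nil]
  rfl
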